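-- pv_equiv track=rewrite | github.com/lopezdp/PythonFun | nthHappyNumber.py | nthHappyNumber
-- ===== SOURCE A (Python) =====
-- def sumOfSquaresOfDigits(n):
-- 	s = 0
-- 	if(n <= 0):
-- 		return n
-- 	else:
-- 		strN = str(n)
-- 		strL = len(strN)
-- 		digit = ""
-- 		tempIntDigit = 0
--
-- 		for digits in range(strL):
-- 			digit = strN[digits:digits+1]
-- 			tempIntDigit = (int((digit)))**2
-- 			s += tempIntDigit
-- 		return s
--
-- def isHappyNumber(n):
-- 	# Starting with any positive integer n, replace the number n by the sum of the squares of its digits,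
-- 	# and repeat the process until the number either equals 1 (where it will stay)
--
-- 	# or it loops endlessly in a cycle that does not include 1
--
-- 	# Those numbers for which this process ends in 1 are happy numbers,
-- 	# while those that do not end in 1 are unhappy numbers (or sad numbers). test idk
--
-- 	firstHappyNum = int(n)
-- 	happyNumBool = False
--
-- 	if(n <= 0):
-- 		return happyNumBool
-- 	else:
-- 		while(firstHappyNum != 1):
-- 			if(sumOfSquaresOfDigits(firstHappyNum) == 1):
-- 				break
-- 			else:
-- 				firstHappyNum = sumOfSquaresOfDigits(firstHappyNum)
--
-- 			if(sumOfSquaresOfDigits(firstHappyNum) == 4):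
-- 				break
-- 			else:
-- 				continue
--
-- 		if(sumOfSquaresOfDigits(firstHappyNum) == 1):
-- 			happyNumBool = True
--
-- 		return happyNumBool
--
-- def nthHappyNumber(n):
-- 	# ****n == sequence and != to to a happy num
-- 	# input is sequence number 2
-- 	# create loop and call function to create sum of squares
-- 	# count each loop that finds a happynum
-- 	# if sum of squares == happy num then append to list through sequence num = 2
-- 	# create all happy nums through sequence 2
-- 	# return happy num pertaining through sequence 2
--
-- 	currentInt = 0 # Place holder for the current integer to test
-- 	currentSequence = 0 # Place holder for the current sequence of HappyNums Found
-- 	foundAHappyNum = 0 # Holds the most recent HappyNum found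
--
-- 	happyLst = list() # list of all happyNums found in a given sequence
--
-- 	while(currentSequence <= n): # tests for the current sequence to be tested
-- 		if(isHappyNumber(currentInt)): # verifies if currentInt is a happyNum
-- 			foundAHappyNum = currentInt # holds any HappyNum found in a given sequence
-- 			happyLst.append(foundAHappyNum) # adds all happyNums to a list to access later
-- 			currentInt += 1 # increments the currentInt being tested
-- 			currentSequence += 1 # increments the currentSequence of happyNums that have been found
-- 			if(currentSequence == n): # inefficient redundancy
-- 				break # breaks out of loop if sequence is == to n sequence we are looking for
-- 		elif(not(isHappyNumber(currentInt))): # if isHappyNumber is False then executes next codeBlock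
-- 			currentInt += 1 # increments currentInt to be tested next
--
-- 	return happyLst[n-1] # returns the happyNum for the given sequence we are looking for
-- ===== SOURCE B (Python) =====
-- def sumOfSquaresOfDigits(n):
--     if n <= 0:
--         return n
--     return sum(int(c) ** 2 for c in str(n))
--
-- def isHappyNumber(n):
--     if n <= 0:
--         return False
--     seen = set()
--     while n != 1:
--         if n in seen:
--             return False
--         seen.add(n)
--         n = sumOfSquaresOfDigits(n)
--     return True
--
-- def nthHappyNumber(n):
--     happyLst = []
--     i = 0
--     while len(happyLst) <= n:
--         if isHappyNumber(i):
--             happyLst.append(i)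
--         i += 1
--     return happyLst[n - 1]
-- ===== Notes on version B (the rewrite author's own statement) =====
-- stated objective: simpler
-- what changed: isHappyNumber now detects cycles with an explicit seen-set (one digit-square-sum per trajectory step) instead of A's triple re-evaluation of sumOfSquaresOfDigits around the reaches-4 sentinel, the digit sum is a single generator pass over str(n) instead of index-sliced substrings, and the outer search is one while-loop keyed on len(happyLst).
import Mathlib
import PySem

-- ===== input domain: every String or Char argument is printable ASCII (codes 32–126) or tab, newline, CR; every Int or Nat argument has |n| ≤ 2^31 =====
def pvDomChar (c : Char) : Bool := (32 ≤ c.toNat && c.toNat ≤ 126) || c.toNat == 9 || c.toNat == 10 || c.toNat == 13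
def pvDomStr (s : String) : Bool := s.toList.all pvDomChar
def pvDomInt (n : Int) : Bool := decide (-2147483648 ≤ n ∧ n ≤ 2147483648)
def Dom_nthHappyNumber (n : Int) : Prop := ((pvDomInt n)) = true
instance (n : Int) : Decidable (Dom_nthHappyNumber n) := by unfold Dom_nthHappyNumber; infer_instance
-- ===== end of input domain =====

-- B replaces A's triple-evaluation 'reaches 4' happiness loop by seen-set cycle detection with one
-- digit-square-sum per step (a simpler, more idiomatic happy-number test); equal wherever A returns.

-- ===== PORT A =====
-- sumOfSquaresOfDigits: per-index slicing of str(n), int(..)**2 accumulated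
def pvSumSqA (n : Int) : Int :=
  if n ≤ 0 then n
  else
    let strN := PySem.Int.toChars n
    let strL := PySem.List.len strN
    (PySem.List.pyRange 0 strL 1).foldl
      (fun s d =>
        s + ((PySem.Int.ofChars? (PySem.List.slice strN (some d) (some (d + 1)))).getD 0) ^ 2) 0

-- the while-loop of isHappyNumber (fuel only makes the loop total; Python runs it until a break)
def pvLoopA : Nat → Int → Int
  | 0, x => x
  | f + 1, x =>
    if x = 1 then x
    else if pvSumSqA x = 1 then x
    else
      let x' := pvSumSqA x
      if pvSumSqA x' = 4 then x' else pvLoopA f x'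

def pvIsHappyA (n : Int) : Bool :=
  if n ≤ 0 then false
  else decide (pvSumSqA (pvLoopA (n.toNat + 1000) n) = 1)

-- the while-loop of nthHappyNumber: state (currentInt, currentSequence, happyLst)
def pvOuterA (n : Int) : Nat → Int → Int → List Int → List Int
  | 0, _, _, lst => lst
  | f + 1, cur, seq, lst =>
    if seq ≤ n then
      if pvIsHappyA cur then
        let lst' := lst ++ [cur]
        if seq + 1 = n then lst' else pvOuterA n f (cur + 1) (seq + 1) lst'
      else if ¬ pvIsHappyA cur then pvOuterA n f (cur + 1) seq lst
      else pvOuterA n f cur seq lst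
    else lst

def nthHappyNumber (n : Int) : Int :=
  PySem.List.pyGetD (pvOuterA n (10 ^ (n.toNat + 1)) 0 0 []) (n - 1) 0

-- ===== PORT B =====
-- sum(int(c) ** 2 for c in str(n))
def pvSumSqB (n : Int) : Int :=
  if n ≤ 0 then n
  else ((PySem.Int.toChars n).map (fun c => ((PySem.Int.ofChars? [c]).getD 0) ^ 2)).sum

-- seen-set cycle-detection loop (fuel only makes the loop total)
def pvLoopB : Nat → Int → PySem.Set Int → Bool
  | 0, _, _ => false
  | f + 1, x, seen =>
    if x = 1 then true
    else if seen.contains x then false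
    else pvLoopB f (pvSumSqB x) (seen.add x)

def pvIsHappyB (n : Int) : Bool :=
  if n ≤ 0 then false else pvLoopB (n.toNat + 1000) n PySem.Set.empty

def pvOuterB (n : Int) : Nat → Int → List Int → List Int
  | 0, _, lst => lst
  | f + 1, i, lst =>
    if PySem.List.len lst ≤ n then
      pvOuterB n f (i + 1) (if pvIsHappyB i then lst ++ [i] else lst)
    else lst

def nthHappyNumber_alt (n : Int) : Int :=
  PySem.List.pyGetD (pvOuterB n (10 ^ (n.toNat + 1)) 0 []) (n - 1) 0

-- ===== PRECONDITION & SPEC =====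
-- Pre_ excludes negative n, where A (and B alike) raises IndexError on happyLst[n-1] of the empty list.
def Pre_nthHappyNumber (n : Int) : Prop := 0 ≤ n
instance (n : Int) : Decidable (Pre_nthHappyNumber n) := by unfold Pre_nthHappyNumber; infer_instance
def pvWitness_nthHappyNumber : Int := 2

def Spec_nthHappyNumber (n : Int) (out : Int) : Prop := out = nthHappyNumber_alt n
instance (n : Int) (out : Int) : Decidable (Spec_nthHappyNumber n out) := by unfold Spec_nthHappyNumber; infer_instance

-- ===== CLAIM (what is proved, stated in full; the proofs are below) =====
def Claim_equal_nthHappyNumber : Prop := ∀ (n : Int), Dom_nthHappyNumber n → Pre_nthHappyNumber n → Spec_nthHappyNumber n (nthHappyNumber n)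

-- ===== LEMMAS AND PROOFS =====

-- digit-square-sum on Nat, over the same character list both ports read
def pvG (m : Nat) : Nat := ((Nat.toDigits 10 m).map (fun c => (c.toNat - 48) ^ 2)).sum

-- exit condition of A's inner loop, and a fuel checker for the finite region fact
def pvEb (m : Nat) : Bool := m == 1 || pvG m == 1 || pvG (pvG m) == 4
def pvChk : Nat → Nat → Bool
  | 0, _ => false
  | f + 1, m => pvEb m || pvChk f (pvG m)

def pvHappyN (m : Nat) : Prop := ∃ k, pvG^[k] m = 1

-- ---- Nat.toDigits recurrence ----
theorem pvTdcAppend (b f : Nat) : ∀ (n : Nat) (ds ds₂ : List Char),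
    Nat.toDigitsCore b f n (ds ++ ds₂) = Nat.toDigitsCore b f n ds ++ ds₂ := by
  induction f with
  | zero => intro n ds ds₂; simp [Nat.toDigitsCore]
  | succ f ih =>
    intro n ds ds₂
    simp only [Nat.toDigitsCore]
    by_cases h : n / b = 0
    · simp [h]
    · simp only [h, if_false]
      exact ih (n / b) (_ :: ds) ds₂

theorem pvTdcFuel (f₁ : Nat) : ∀ (f₂ n : Nat) (ds : List Char), n < f₁ → n < f₂ →
    Nat.toDigitsCore 10 f₁ n ds = Nat.toDigitsCore 10 f₂ n ds := by
  induction f₁ with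
  | zero => intro f₂ n ds h1 h2; omega
  | succ f ih =>
    intro f₂ n ds h1 h2
    obtain ⟨f₂', rfl⟩ : ∃ f₂', f₂ = f₂' + 1 := ⟨f₂ - 1, by omega⟩
    simp only [Nat.toDigitsCore]
    by_cases h : n / 10 = 0
    · simp [h]
    · simp only [h, if_false]
      exact ih f₂' (n / 10) _ (by omega) (by omega)

theorem pvTdLt (m : Nat) (h : m < 10) : Nat.toDigits 10 m = [Nat.digitChar m] := by
  simp only [Nat.toDigits, Nat.toDigitsCore]
  have h1 : m / 10 = 0 := by omega
  have h2 : m % 10 = m := by omega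
  simp [h1, h2]

theorem pvTdGe (m : Nat) (h : 10 ≤ m) :
    Nat.toDigits 10 m = Nat.toDigits 10 (m / 10) ++ [Nat.digitChar (m % 10)] := by
  simp only [Nat.toDigits]
  conv_lhs => simp only [Nat.toDigitsCore]
  have h1 : ¬ m / 10 = 0 := by omega
  simp only [h1, if_false]
  have := pvTdcAppend 10 m (m / 10) [] [Nat.digitChar (m % 10)]
  simp only [List.nil_append] at this
  rw [this]
  rw [pvTdcFuel m (m / 10 + 1) (m / 10) [] (by omega) (by omega)]

-- ---- pvG recurrence and bounds ----
theorem pvDigitCharVal (d : Nat) (h : d < 10) : (Nat.digitChar d).toNat - 48 = d := by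
  interval_cases d <;> rfl

theorem pvG_lt (m : Nat) (h : m < 10) : pvG m = m ^ 2 := by
  simp [pvG, pvTdLt m h, pvDigitCharVal m h]

theorem pvG_ge (m : Nat) (h : 10 ≤ m) : pvG m = pvG (m / 10) + (m % 10) ^ 2 := by
  simp [pvG, pvTdGe m h, pvDigitCharVal (m % 10) (by omega)]

theorem pvSq_le (d : Nat) (h : d ≤ 9) : d ^ 2 ≤ 81 := by nlinarith

theorem pvG_pos : ∀ m : Nat, 1 ≤ m → 1 ≤ pvG m := by
  intro m
  induction m using Nat.strong_induction_on with
  | _ m ih =>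
    intro h1
    by_cases h : m < 10
    · rw [pvG_lt m h]; nlinarith
    · rw [pvG_ge m (by omega)]
      have := ih (m / 10) (by omega) (by omega)
      omega

theorem pvG_le162 : ∀ m : Nat, m ≤ 99 → pvG m ≤ 162 := by
  intro m h
  by_cases h1 : m < 10
  · rw [pvG_lt m h1]; nlinarith
  · rw [pvG_ge m (by omega)]
    rw [pvG_lt (m / 10) (by omega)]
    have := pvSq_le (m % 10) (by omega)
    have : (m / 10) ^ 2 ≤ 81 := pvSq_le _ (by omega)
    omega

theorem pvG_le243 : ∀ m : Nat, m ≤ 999 → pvG m ≤ 243 := by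
  intro m h
  by_cases h1 : m ≤ 99
  · have := pvG_le162 m h1; omega
  · rw [pvG_ge m (by omega)]
    have := pvG_le162 (m / 10) (by omega)
    have := pvSq_le (m % 10) (by omega)
    omega

theorem pvG_dec : ∀ m : Nat, 244 ≤ m → pvG m < m := by
  intro m
  induction m using Nat.strong_induction_on with
  | _ m ih =>
    intro h
    by_cases h1 : m ≤ 999
    · have := pvG_le243 m h1; omega
    · rw [pvG_ge m (by omega)]
      have hsq := pvSq_le (m % 10) (by omega)
      by_cases h2 : m / 10 ≤ 243
      · have := pvG_le243 (m / 10) (by omega)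
        omega
      · have := ih (m / 10) (by omega) (by omega)
        omega

-- ---- the ports' digit sums compute pvG ----
theorem pvOfCharsDigit (d : Nat) (h : d < 10) : PySem.Int.ofChars? [Nat.digitChar d] = some (d : Int) := by
  interval_cases d <;> decide

theorem pvSumNat : ∀ m : Nat, 1 ≤ m →
    (((Nat.toDigits 10 m).map (fun c => ((PySem.Int.ofChars? [c]).getD 0) ^ 2)).sum : Int)
      = (pvG m : Int) := by
  intro m
  induction m using Nat.strong_induction_on with
  | _ m ih =>
    intro h1
    by_cases h : m < 10
    · rw [pvTdLt m h, pvG_lt m h]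
      simp [pvOfCharsDigit m h]
    · rw [pvTdGe m (by omega), pvG_ge m (by omega)]
      simp only [List.map_append, List.sum_append, List.map_cons, List.map_nil, List.sum_cons,
        List.sum_nil]
      rw [ih (m / 10) (by omega) (by omega)]
      simp [pvOfCharsDigit (m % 10) (by omega)]

theorem pvToCharsPos (x : Int) (h : 1 ≤ x) : PySem.Int.toChars x = Nat.toDigits 10 x.toNat := by
  simp [PySem.Int.toChars]
  omega

theorem pvSumSqB_eq (x : Int) (h : 1 ≤ x) : pvSumSqB x = (pvG x.toNat : Int) := by
  rw [pvSumSqB, if_neg (by omega), pvToCharsPos x h]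
  exact pvSumNat x.toNat (by omega)

theorem pvMapRange {α β : Type} (cs : List α) (f : α → β) (d : α) :
    (List.range cs.length).map (fun k => f (cs.getD k d)) = cs.map f := by
  induction cs with
  | nil => simp
  | cons c t ih =>
    simp only [List.length_cons, List.range_succ_eq_map, List.map_cons, List.map_map]
    simp only [Function.comp_def, List.getD_eq_getElem?_getD, List.getElem?_cons_succ]
    simp only [List.getD_eq_getElem?_getD] at ih
    rw [ih]
    simp

theorem pvTakeOneDrop {α : Type} (l : List α) (k : Nat) (hk : k < l.length) :
    (l.drop k).take 1 = [l[k]] := by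
  rw [List.drop_eq_getElem_cons hk]
  rfl

theorem pvSumSqA_eq (x : Int) (h : 1 ≤ x) : pvSumSqA x = pvSumSqB x := by
  rw [pvSumSqA, pvSumSqB, if_neg (by omega), if_neg (by omega)]
  set cs := PySem.Int.toChars x with hcs
  rw [PySem.List.foldl_add]
  rw [PySem.List.len_eq, PySem.List.pyRange_one, List.map_map]
  simp only [Int.sub_zero, Int.toNat_natCast, zero_add, Function.comp_def]
  have hpt : ∀ k ∈ List.range cs.length,
      ((PySem.Int.ofChars? (PySem.List.slice cs (some ((k : Nat) : Int)) (some (((k : Nat) : Int) + 1)))).getD 0) ^ 2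
        = (fun c => ((PySem.Int.ofChars? [c]).getD 0) ^ 2) (cs.getD k 'x') := by
    intro k hk
    rw [List.mem_range] at hk
    rw [show ((k : Nat) : Int) + 1 = ((k : Nat) : Int) + ((1 : Nat) : Int) from by push_cast; ring]
    rw [PySem.List.slice_natCast_add, pvTakeOneDrop cs k hk, List.getD_eq_getElem cs 'x' hk]
  rw [List.map_congr_left hpt]
  exact congrArg List.sum (pvMapRange cs (fun c => ((PySem.Int.ofChars? [c]).getD 0) ^ 2) 'x')

theorem pvSumSqCast (m : Nat) (hm : 1 ≤ m) : pvSumSqA ((m : Nat) : Int) = (pvG m : Int) := by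
  rw [pvSumSqA_eq _ (by exact_mod_cast hm), pvSumSqB_eq _ (by exact_mod_cast hm)]
  simp

-- ---- finite region facts (kernel computation) ----
set_option maxRecDepth 10000 in
theorem pvR1 : ∀ m < 244, 1 ≤ m → pvChk 15 m = true := by decide
theorem pvR2 : ∀ y ∈ [4, 16, 37, 58, 89, 145, 42, 20], pvG y ∈ [4, 16, 37, 58, 89, 145, 42, 20] := by decide

theorem pvChk_spec : ∀ f m, pvChk f m = true → ∃ k < f, pvEb (pvG^[k] m) = true := by
  intro f
  induction f with
  | zero => intro m h; simp [pvChk] at h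
  | succ f ih =>
    intro m h
    rw [pvChk, Bool.or_eq_true] at h
    rcases h with h | h
    · exact ⟨0, by omega, h⟩
    · obtain ⟨k, hk, he⟩ := ih (pvG m) h
      exact ⟨k + 1, by omega, by rwa [Function.iterate_succ_apply]⟩

theorem pvReach : ∀ m : Nat, 1 ≤ m → ∃ k ≤ m + 25, pvEb (pvG^[k] m) = true := by
  intro m
  induction m using Nat.strong_induction_on with
  | _ m ih =>
    intro h1
    by_cases h : m < 244
    · obtain ⟨k, hk, he⟩ := pvChk_spec 15 m (pvR1 m h h1)
      exact ⟨k, by omega, he⟩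
    · have hd := pvG_dec m (by omega)
      have hp := pvG_pos m (by omega)
      obtain ⟨k, hk, he⟩ := ih (pvG m) hd hp
      refine ⟨k + 1, by omega, ?_⟩
      rwa [Function.iterate_succ_apply]

theorem pvOrbit : ∀ j, pvG^[j] 4 ∈ [4, 16, 37, 58, 89, 145, 42, 20] := by
  intro j
  induction j with
  | zero => simp
  | succ j ih =>
    rw [Function.iterate_succ_apply']
    exact pvR2 _ ih

theorem pvFourNotOne : ∀ j, pvG^[j] 4 ≠ 1 := by
  intro j h
  have := pvOrbit j
  rw [h] at this
  simp at this

theorem pvOneFix : ∀ k, pvG^[k] 1 = 1 := by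
  intro k
  induction k with
  | zero => rfl
  | succ k ih => rw [Function.iterate_succ_apply', ih]; decide

theorem pvHappyStable (m k j : Nat) (h : pvG^[k] m = 1) (hkj : k ≤ j) : pvG^[j] m = 1 := by
  obtain ⟨t, rfl⟩ : ∃ t, j = t + k := ⟨j - k, by omega⟩
  rw [Function.iterate_add_apply, h]
  exact pvOneFix t

theorem pvEb_not_happy (m : Nat) (h1 : m ≠ 1) (h2 : pvG m ≠ 1) (h3 : pvG (pvG m) = 4) :
    ¬ pvHappyN m := by
  rintro ⟨k, hk⟩
  match k, hk with
  | 0, hk => exact h1 hk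
  | 1, hk => exact h2 hk
  | (j + 2), hk =>
    rw [show j + 2 = j + 1 + 1 from rfl, Function.iterate_succ_apply,
      Function.iterate_succ_apply] at hk
    rw [h3] at hk
    exact pvFourNotOne j hk

theorem pvHappyShift (m : Nat) (hm : m ≠ 1) : pvHappyN (pvG m) ↔ pvHappyN m := by
  constructor
  · rintro ⟨k, hk⟩
    exact ⟨k + 1, by rwa [Function.iterate_succ_apply]⟩
  · rintro ⟨k, hk⟩
    match k, hk with
    | 0, hk => exact absurd hk hm
    | k + 1, hk => exact ⟨k, by rwa [Function.iterate_succ_apply] at hk⟩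

-- ---- A's inner loop decides happiness ----
theorem pvLA : ∀ (f m : Nat), 1 ≤ m → (∃ k, k + 1 ≤ f ∧ pvEb (pvG^[k] m) = true) →
    ((pvSumSqA (pvLoopA f (m : Int)) = 1) ↔ pvHappyN m) := by
  intro f
  induction f with
  | zero => rintro m hm ⟨k, hk, _⟩; omega
  | succ f ih =>
    rintro m hm ⟨k, hkf, hke⟩
    have hA : pvSumSqA (m : Int) = (pvG m : Int) := pvSumSqCast m hm
    simp only [pvLoopA]
    by_cases h1 : (m : Int) = 1
    · have hm1 : m = 1 := by exact_mod_cast h1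
      rw [if_pos h1, h1]
      exact ⟨fun _ => ⟨0, by simpa using hm1⟩, fun _ => by decide⟩
    · rw [if_neg h1]
      have hm1 : m ≠ 1 := fun he => h1 (by exact_mod_cast congrArg (Nat.cast (R := Int)) he)
      by_cases h2 : pvSumSqA (m : Int) = 1
      · rw [if_pos h2]
        have hg : pvG m = 1 := by rw [hA] at h2; exact_mod_cast h2
        refine ⟨fun _ => ⟨1, by simpa using hg⟩, fun _ => h2⟩
      · rw [if_neg h2]
        have hg1 : pvG m ≠ 1 := fun he => h2 (by rw [hA, he]; rfl)
        have hgpos : 1 ≤ pvG m := pvG_pos m hm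
        have hA2 : pvSumSqA (pvSumSqA (m : Int)) = (pvG (pvG m) : Int) := by
          rw [hA]; exact pvSumSqCast (pvG m) hgpos
        by_cases h3 : pvSumSqA (pvSumSqA (m : Int)) = 4
        · rw [if_pos h3]
          have hg4 : pvG (pvG m) = 4 := by rw [hA2] at h3; exact_mod_cast h3
          constructor
          · intro habs
            rw [hA2] at habs
            have : pvG (pvG m) = 1 := by exact_mod_cast habs
            omega
          · intro hh
            exact absurd hh (pvEb_not_happy m hm1 hg1 hg4)
        · rw [if_neg h3]
          have hg4 : pvG (pvG m) ≠ 4 := fun he => h3 (by rw [hA2, he]; rfl)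
          have hEb : pvEb m = false := by
            simp [pvEb, hm1, hg1, hg4]
          have hk0 : k ≠ 0 := by
            intro he; rw [he] at hke; simp at hke; rw [hke] at hEb; simp at hEb
          rw [hA]
          rw [ih (pvG m) hgpos ⟨k - 1, by omega, by
            rw [← Function.iterate_succ_apply pvG (k - 1) m]
            have hkk : (k - 1).succ = k := by omega
            rw [hkk]; exact hke⟩]
          exact pvHappyShift m hm1

theorem pvIsHappyA_iff (x : Int) (h : 1 ≤ x) : pvIsHappyA x = true ↔ pvHappyN x.toNat := by
  rw [pvIsHappyA, if_neg (by omega)]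
  rw [show x = ((x.toNat : Nat) : Int) from by omega]
  simp only [Int.toNat_natCast, decide_eq_true_eq]
  apply pvLA
  · omega
  · obtain ⟨k, hk, he⟩ := pvReach x.toNat (by omega)
    exact ⟨k, by omega, he⟩

-- ---- B's inner loop decides happiness ----
theorem pvLB_nothappy : ∀ (f : Nat) (m : Nat) (seen : PySem.Set Int), 1 ≤ m → ¬ pvHappyN m →
    pvLoopB f (m : Int) seen = false := by
  intro f
  induction f with
  | zero => intro m seen _ _; rfl
  | succ f ih =>
    intro m seen hm hh
    simp only [pvLoopB]
    have hm1 : m ≠ 1 := fun he => hh ⟨0, by simpa using he⟩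
    rw [if_neg (fun he => hm1 (by exact_mod_cast he))]
    by_cases hc : seen.contains ((m : Nat) : Int)
    · rw [if_pos hc]
    · rw [if_neg hc]
      rw [pvSumSqB_eq _ (by exact_mod_cast hm)]
      simp only [Int.toNat_natCast]
      exact ih (pvG m) _ (pvG_pos m hm) (fun hx => hh ((pvHappyShift m hm1).mp hx))

theorem pvLB_happy : ∀ (k m : Nat) (seen : PySem.Set Int) (f : Nat), 1 ≤ m →
    pvG^[k] m = 1 → (∀ j < k, pvG^[j] m ≠ 1) → k + 1 ≤ f →
    (∀ j < k, ((pvG^[j] m : Nat) : Int) ∉ seen) →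
    pvLoopB f (m : Int) seen = true := by
  intro k
  induction k with
  | zero =>
    intro m seen f hm hk _ hf _
    simp only [Function.iterate_zero_apply] at hk
    obtain ⟨f', rfl⟩ : ∃ f', f = f' + 1 := ⟨f - 1, by omega⟩
    simp only [pvLoopB]
    rw [if_pos (by rw [hk]; rfl)]
  | succ k ih =>
    intro m seen f hm hk hmin hf hnotin
    obtain ⟨f', rfl⟩ : ∃ f', f = f' + 1 := ⟨f - 1, by omega⟩
    simp only [pvLoopB]
    have hm1 : m ≠ 1 := by
      have := hmin 0 (by omega); simpa using this
    rw [if_neg (fun he => hm1 (by exact_mod_cast he))]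
    have hnm : ((m : Nat) : Int) ∉ seen := by
      have := hnotin 0 (by omega); simpa using this
    rw [if_neg (by
      intro hc
      exact hnm (by simpa using (List.contains_iff_mem).mp hc))]
    rw [pvSumSqB_eq _ (by exact_mod_cast hm)]
    simp only [Int.toNat_natCast]
    apply ih (pvG m) (seen.add (m : Int)) f' (pvG_pos m hm)
    · rwa [← Function.iterate_succ_apply]
    · intro j hj he
      exact hmin (j + 1) (by omega) (by rwa [Function.iterate_succ_apply])
    · omega
    · intro j hj hmem
      rw [PySem.Set.mem_add] at hmem
      rcases hmem with hmem | hmem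
      · exact hnotin (j + 1) (by omega) (by rwa [Function.iterate_succ_apply])
      · have hvm : pvG^[j + 1] m = m := by exact_mod_cast hmem
        have hshift : pvG^[(k + 1) - (j + 1)] m = 1 := by
          have h1 : pvG^[(k + 1) - (j + 1)] (pvG^[j + 1] m) = pvG^[k + 1] m := by
            rw [← Function.iterate_add_apply]
            congr 1
            omega
          rw [hvm] at h1
          rw [h1, hk]
        exact hmin ((k + 1) - (j + 1)) (by omega) hshift

theorem pvIsHappyB_iff (x : Int) (h : 1 ≤ x) : pvIsHappyB x = true ↔ pvHappyN x.toNat := by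
  rw [pvIsHappyB, if_neg (by omega)]
  constructor
  · intro ht
    by_contra hh
    rw [show x = ((x.toNat : Nat) : Int) from by omega] at ht
    rw [pvLB_nothappy _ _ _ (by omega) hh] at ht
    exact Bool.false_ne_true ht
  · intro hh
    have hne : ∃ k, pvG^[k] x.toNat = 1 := hh
    set k₀ := Nat.find hne with hk₀
    have hspec : pvG^[k₀] x.toNat = 1 := Nat.find_spec hne
    have hmin : ∀ j < k₀, pvG^[j] x.toNat ≠ 1 := fun j hj => Nat.find_min hne hj
    have hbound : k₀ ≤ x.toNat + 26 := by
      obtain ⟨k, hk, he⟩ := pvReach x.toNat (by omega)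
      simp only [pvEb, Bool.or_eq_true, beq_iff_eq] at he
      rcases he with (he | he) | he
      · have := Nat.find_min' hne he
        omega
      · have h1 : pvG^[k + 1] x.toNat = 1 := by rwa [Function.iterate_succ_apply']
        have := Nat.find_min' hne h1
        omega
      · by_cases hy1 : pvG^[k] x.toNat = 1
        · have := Nat.find_min' hne hy1; omega
        · by_cases hy2 : pvG (pvG^[k] x.toNat) = 1
          · have h1 : pvG^[k + 1] x.toNat = 1 := by rwa [Function.iterate_succ_apply']
            have := Nat.find_min' hne h1
            omega
          · exfalso
            have hnh : ¬ pvHappyN (pvG^[k] x.toNat) := pvEb_not_happy _ hy1 hy2 he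
            apply hnh
            by_cases hkk : k₀ ≤ k
            · exact absurd (pvHappyStable _ k₀ k hspec hkk) hy1
            · refine ⟨k₀ - k, ?_⟩
              rw [← Function.iterate_add_apply]
              rw [show k₀ - k + k = k₀ from by omega]
              exact hspec
    rw [show x = ((x.toNat : Nat) : Int) from by omega]
    exact pvLB_happy k₀ x.toNat PySem.Set.empty (x.toNat + 1000) (by omega) hspec hmin
      (by omega) (fun j hj => by simp [PySem.Set.empty])

theorem pvIsHappy_eq (x : Int) : pvIsHappyA x = pvIsHappyB x := by
  by_cases h : x ≤ 0
  · rw [pvIsHappyA, pvIsHappyB, if_pos h, if_pos h]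
  · have h1 : 1 ≤ x := by omega
    have := (pvIsHappyA_iff x h1).trans (pvIsHappyB_iff x h1).symm
    cases hA : pvIsHappyA x <;> cases hB : pvIsHappyB x <;> simp_all

-- ---- the outer loops agree ----
theorem pvExtB (n : Int) : ∀ (f : Nat) (i : Int) (lst : List Int),
    ∃ r, pvOuterB n f i lst = lst ++ r := by
  intro f
  induction f with
  | zero => intro i lst; exact ⟨[], by simp [pvOuterB]⟩
  | succ f ih =>
    intro i lst
    simp only [pvOuterB]
    by_cases hc : PySem.List.len lst ≤ n
    · rw [if_pos hc]
      by_cases hH : pvIsHappyB i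
      · rw [if_pos hH]
        obtain ⟨r', hr'⟩ := ih (i + 1) (lst ++ [i])
        exact ⟨[i] ++ r', by rw [hr', List.append_assoc]⟩
      · rw [if_neg hH]
        exact ih (i + 1) lst
    · rw [if_neg hc]
      exact ⟨[], by simp⟩

theorem pvMain (n : Int) (hn : 0 ≤ n) : ∀ (f : Nat) (cur : Int) (lst : List Int),
    ∃ r, pvOuterB n f cur lst = pvOuterA n f cur (lst.length : Int) lst ++ r ∧
      (r ≠ [] → (pvOuterA n f cur (lst.length : Int) lst).length = n.toNat ∧ 1 ≤ n) := by
  intro f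
  induction f with
  | zero =>
    intro cur lst
    exact ⟨[], by simp [pvOuterA, pvOuterB], by simp⟩
  | succ f ih =>
    intro cur lst
    simp only [pvOuterA, pvOuterB, PySem.List.len_eq]
    by_cases hc : (lst.length : Int) ≤ n
    · rw [if_pos hc, if_pos hc]
      by_cases hH : pvIsHappyA cur
      · rw [if_pos hH, if_pos (by rw [← pvIsHappy_eq]; exact hH)]
        by_cases hbreak : (lst.length : Int) + 1 = n
        · rw [if_pos hbreak]
          obtain ⟨r, hr⟩ := pvExtB n f (cur + 1) (lst ++ [cur])
          refine ⟨r, hr, fun _ => ⟨?_, by omega⟩⟩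
          simp only [List.length_append, List.length_cons, List.length_nil]
          omega
        · rw [if_neg hbreak]
          obtain ⟨r, hr, hcond⟩ := ih (cur + 1) (lst ++ [cur])
          have hlen : ((lst ++ [cur]).length : Int) = (lst.length : Int) + 1 := by
            simp
          rw [hlen] at hr hcond
          exact ⟨r, hr, hcond⟩
      · have hBB : ¬ pvIsHappyB cur = true := by rw [← pvIsHappy_eq]; exact hH
        rw [if_neg hH, if_pos hH, if_neg hBB]
        exact ih (cur + 1) lst
    · rw [if_neg hc, if_neg hc]
      exact ⟨[], by simp, by simp⟩

-- ===== VERDICT (by name: the statement is the Claim_ definition above) =====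
theorem nthHappyNumber_spec : Claim_equal_nthHappyNumber := by
  intro n _ hn
  unfold Spec_nthHappyNumber nthHappyNumber nthHappyNumber_alt
  obtain ⟨r, hB, hcond⟩ := pvMain n hn (10 ^ (n.toNat + 1)) 0 []
  simp only [List.length_nil, Nat.cast_zero] at hB hcond
  rw [hB]
  rcases r with _ | ⟨a, r⟩
  · rw [List.append_nil]
  · obtain ⟨hlen, hn1⟩ := hcond (by simp)
    set La := pvOuterA n (10 ^ (n.toNat + 1)) 0 0 [] with hLa
    have hlt : n - 1 < (La.length : Int) := by omega
    have hge : 0 ≤ n - 1 := by omega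
    rw [PySem.List.pyGetD_eq_getElem La 0 hge (by exact_mod_cast hlt)]
    rw [PySem.List.pyGetD_eq_getElem (La ++ a :: r) 0 hge
      (by simp only [List.length_append]; push_cast; omega)]
    rw [List.getElem_append_left]
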